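-- pv_equiv track=rewrite | github.com/CodeCreare/MakeLinesFromRecords | Common_MakeLinesFromRecords.py | MakeLayouts_Only1TitleKey
-- ===== SOURCE A (Python) =====
-- def MakeLayouts_Only1TitleKey(layouts, keys_title, record):
-- 	layouts_exist	= []
-- 	title_exist		= False
-- 	for layout in layouts:
-- 		key		= layout[0]
-- 		if key == 'RIGHT_EDGE' or key not in keys_title:
-- 			layouts_exist.append(layout)
-- 		else:
-- 			if key in record and title_exist == False:
-- 				layouts_exist.append(layout)
-- 				title_exist		= True
--
-- 	return layouts_exist
-- ===== SOURCE B (Python) =====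
-- def MakeLayouts_Only1TitleKey(layouts, keys_title, record):
-- 	found = None
-- 	for i, layout in enumerate(layouts):
-- 		key = layout[0]
-- 		if key != 'RIGHT_EDGE' and key in keys_title and key in record:
-- 			found = i
-- 			break
-- 	result = []
-- 	for i, layout in enumerate(layouts):
-- 		key = layout[0]
-- 		if key == 'RIGHT_EDGE' or key not in keys_title or i == found:
-- 			result.append(layout)
-- 	return result
-- ===== Notes on version B (the rewrite author's own statement) =====
-- stated objective: alternative
-- what changed: Replaces A's single stateful pass carrying a title_exist flag by two stateless index passes: first find the index of the first matching title layout, then filter by index, so no mutable flag threads through the output loop.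
import Mathlib
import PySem

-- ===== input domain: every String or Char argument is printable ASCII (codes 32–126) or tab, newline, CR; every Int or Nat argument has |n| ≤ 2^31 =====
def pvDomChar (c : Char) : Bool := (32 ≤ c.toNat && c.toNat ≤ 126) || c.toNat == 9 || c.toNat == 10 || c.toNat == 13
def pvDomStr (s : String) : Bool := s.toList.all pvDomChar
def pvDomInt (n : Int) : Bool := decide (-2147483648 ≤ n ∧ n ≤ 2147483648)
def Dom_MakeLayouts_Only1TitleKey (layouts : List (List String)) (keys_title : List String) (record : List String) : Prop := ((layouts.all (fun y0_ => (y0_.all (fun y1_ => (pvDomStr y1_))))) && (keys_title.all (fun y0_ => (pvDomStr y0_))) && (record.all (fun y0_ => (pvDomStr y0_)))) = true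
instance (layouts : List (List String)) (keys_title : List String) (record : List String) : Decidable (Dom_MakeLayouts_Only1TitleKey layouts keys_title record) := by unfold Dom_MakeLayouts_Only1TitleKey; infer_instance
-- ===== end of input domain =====

-- B replaces A's single stateful pass (title_exist flag) by two stateless index passes
-- (find the first matching title index, then filter by index); return values proved equal.


-- ===== PORT A =====
-- literal fold of A's single loop, state = (layouts_exist, title_exist);
-- layout[0] is read with headD "" — Pre_ excludes empty layouts, where Python raises IndexError
def MakeLayouts_Only1TitleKey (layouts : List (List String)) (keys_title : List String) (record : List String) : List (List String) :=
  (layouts.foldl (fun (st : List (List String) × Bool) layout =>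
      let key := layout.headD ""
      if key == "RIGHT_EDGE" || !(keys_title.contains key) then
        (st.1 ++ [layout], st.2)
      else
        if record.contains key && st.2 == false then
          (st.1 ++ [layout], true)
        else st)
    ([], false)).1

-- ===== PORT B =====
-- first pass of Source B: the enumerate loop with break, as index-carrying recursion
def pvFindTitle (keys_title record : List String) : Nat → List (List String) → Option Nat
  | _, [] => none
  | i, layout :: rest =>
    let key := layout.headD ""
    if key != "RIGHT_EDGE" && keys_title.contains key && record.contains key then some i
    else pvFindTitle keys_title record (i + 1) rest

-- second pass of Source B: the enumerate filter loop, as index-carrying recursion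
def pvBuild (keys_title : List String) (found : Option Nat) : Nat → List (List String) → List (List String)
  | _, [] => []
  | i, layout :: rest =>
    let key := layout.headD ""
    if key == "RIGHT_EDGE" || !(keys_title.contains key) || found == some i then
      layout :: pvBuild keys_title found (i + 1) rest
    else
      pvBuild keys_title found (i + 1) rest

def MakeLayouts_Only1TitleKey_alt (layouts : List (List String)) (keys_title : List String) (record : List String) : List (List String) :=
  pvBuild keys_title (pvFindTitle keys_title record 0 layouts) 0 layouts

-- ===== PRECONDITION & SPEC =====
-- Pre_ excludes layouts containing an empty row: there layout[0] raises IndexError in both A and B.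
def Pre_MakeLayouts_Only1TitleKey (layouts : List (List String)) (keys_title : List String) (record : List String) : Prop :=
  ∀ l ∈ layouts, l ≠ []
instance (layouts : List (List String)) (keys_title : List String) (record : List String) : Decidable (Pre_MakeLayouts_Only1TitleKey layouts keys_title record) := by unfold Pre_MakeLayouts_Only1TitleKey; infer_instance
def pvWitness_MakeLayouts_Only1TitleKey : List (List String) × List String × List String :=
  ([["RIGHT_EDGE"], ["a", "x"], ["b"]], ["a", "b"], ["a", "b"])

def Spec_MakeLayouts_Only1TitleKey (layouts : List (List String)) (keys_title : List String) (record : List String) (out : List (List String)) : Prop := out = MakeLayouts_Only1TitleKey_alt layouts keys_title record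
instance (layouts : List (List String)) (keys_title : List String) (record : List String) (out : List (List String)) : Decidable (Spec_MakeLayouts_Only1TitleKey layouts keys_title record out) := by unfold Spec_MakeLayouts_Only1TitleKey; infer_instance

-- ===== CLAIM (what is proved, stated in full; the proofs are below) =====
def Claim_equal_MakeLayouts_Only1TitleKey : Prop := ∀ (layouts : List (List String)) (keys_title : List String) (record : List String), Dom_MakeLayouts_Only1TitleKey layouts keys_title record → Pre_MakeLayouts_Only1TitleKey layouts keys_title record → Spec_MakeLayouts_Only1TitleKey layouts keys_title record (MakeLayouts_Only1TitleKey layouts keys_title record)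

-- ===== LEMMAS AND PROOFS =====

-- recursive characterisation of A's fold
def pvARec (keys_title record : List String) : Bool → List (List String) → List (List String)
  | _, [] => []
  | flag, layout :: rest =>
    let key := layout.headD ""
    if key == "RIGHT_EDGE" || !(keys_title.contains key) then
      layout :: pvARec keys_title record flag rest
    else
      if record.contains key && flag == false then
        layout :: pvARec keys_title record true rest
      else
        pvARec keys_title record flag rest

theorem pvAFold_eq (keys_title record : List String) :
    ∀ (layouts : List (List String)) (acc : List (List String)) (flag : Bool),
    (layouts.foldl (fun (st : List (List String) × Bool) layout =>
      let key := layout.headD ""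
      if key == "RIGHT_EDGE" || !(keys_title.contains key) then
        (st.1 ++ [layout], st.2)
      else
        if record.contains key && st.2 == false then
          (st.1 ++ [layout], true)
        else st) (acc, flag)).1
    = acc ++ pvARec keys_title record flag layouts := by
  intro layouts
  induction layouts with
  | nil => intro acc flag; simp [pvARec]
  | cons l rest ih =>
    intro acc flag
    simp only [List.foldl, pvARec]
    split
    · rw [ih]; simp
    · split
      · rw [ih]; simp
      · rw [ih]

theorem pvFindTitle_ge (keys_title record : List String) :
    ∀ (layouts : List (List String)) (n k : Nat),
    pvFindTitle keys_title record n layouts = some k → n ≤ k := by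
  intro layouts
  induction layouts with
  | nil => intro n k h; simp [pvFindTitle] at h
  | cons l rest ih =>
    intro n k h
    simp only [pvFindTitle] at h
    split at h
    · cases h; exact le_refl _
    · exact Nat.le_of_succ_le (ih (n + 1) k h)

theorem pvBuild_stale (keys_title : List String) :
    ∀ (layouts : List (List String)) (n : Nat) (f : Option Nat),
    (∀ k, f = some k → k < n) →
    pvBuild keys_title f n layouts = pvBuild keys_title none n layouts := by
  intro layouts
  induction layouts with
  | nil => intro n f _; rfl
  | cons l rest ih =>
    intro n f hf
    have hne : (f == some n) = false := by
      cases f with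
      | none => rfl
      | some k => have := hf k rfl; simp; omega
    have hnone : ((none : Option Nat) == some n) = false := rfl
    have hrec := ih (n + 1) f (fun k hk => Nat.lt_succ_of_lt (hf k hk))
    simp only [pvBuild, hne, hnone, hrec]

theorem pvARec_true (keys_title record : List String) :
    ∀ (layouts : List (List String)) (n : Nat),
    pvARec keys_title record true layouts = pvBuild keys_title none n layouts := by
  intro layouts
  induction layouts with
  | nil => intro n; rfl
  | cons l rest ih =>
    intro n
    have hnone : ((none : Option Nat) == some n) = false := rfl
    by_cases h1 : l.head?.getD "" = "RIGHT_EDGE" <;> by_cases h2 : l.head?.getD "" ∈ keys_title <;>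
      simp [pvARec, pvBuild, h1, h2, hnone, ih (n + 1)]

theorem pvARec_false (keys_title record : List String) :
    ∀ (layouts : List (List String)) (n : Nat),
    pvARec keys_title record false layouts
      = pvBuild keys_title (pvFindTitle keys_title record n layouts) n layouts := by
  intro layouts
  induction layouts with
  | nil => intro n; rfl
  | cons l rest ih =>
    intro n
    by_cases h1 : l.head?.getD "" = "RIGHT_EDGE"
    · simp [pvARec, pvBuild, pvFindTitle, h1, ih (n + 1)]
    · by_cases h2 : l.head?.getD "" ∈ keys_title
      · by_cases h3 : l.head?.getD "" ∈ record
        · -- first matching title layout: found = some n, kept; rest built with a stale index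
          have htrue := pvARec_true keys_title record rest (n + 1)
          have hst := pvBuild_stale keys_title rest (n + 1) (some n)
            (by intro k hk; cases hk; omega)
          simp [pvARec, pvBuild, pvFindTitle, h1, h2, h3, htrue, hst]
        · -- a title key not in record: dropped by both; found lies beyond n
          have hne : (pvFindTitle keys_title record (n + 1) rest == some n) = false := by
            cases hf : pvFindTitle keys_title record (n + 1) rest with
            | none => rfl
            | some k =>
              have := pvFindTitle_ge keys_title record rest (n + 1) k hf
              simp; omega
          simp [pvARec, pvBuild, pvFindTitle, h1, h2, h3, hne, ih (n + 1)]
      · simp [pvARec, pvBuild, pvFindTitle, h1, h2, ih (n + 1)]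

-- ===== VERDICT (by name: the statement is the Claim_ definition above) =====
theorem MakeLayouts_Only1TitleKey_spec : Claim_equal_MakeLayouts_Only1TitleKey := by
  intro layouts keys_title record _ _
  unfold Spec_MakeLayouts_Only1TitleKey MakeLayouts_Only1TitleKey MakeLayouts_Only1TitleKey_alt
  rw [pvAFold_eq keys_title record layouts [] false, List.nil_append]
  exact pvARec_false keys_title record layouts 0
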